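-- pv_equiv track=rewrite | github.com/gudrb4869/algorithm | 카카오 문제모음/2018 KAKAO BLIND RECRUITMENT/[3차] 방금그곡.py | solution
-- ===== SOURCE A (Python) =====
-- def convert(s):
--     stack = []
--     for c in s:
--         if c == '#':
--             stack.append(stack.pop().lower())
--         else:
--             stack.append(c)
--     return ''.join(stack)
--
-- def solution(m, musicinfos):
--     result = []
--     m = convert(m)
--     for i in range(len(musicinfos)):
--         start, end, title, info = musicinfos[i].split(',')
--         info = convert(info)
--         start = int(start[:2]) * 60 + int(start[3:])
--         end = int(end[:2]) * 60 + int(end[3:])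
--         time = end - start
--         div, mod = divmod(time, len(info))
--         melody = info * div + info[:mod]
--         if m in melody:
--             result.append([time, i, title])
--     result.sort(key=lambda x: (-x[0], x[1]))
--     return result[0][2] if result else '(None)'
-- ===== SOURCE B (Python) =====
-- def convert(s):
--     out = []
--     for i, c in enumerate(s):
--         if c != '#':
--             out.append(c.lower() if s[i+1:i+2] == '#' else c)
--     return ''.join(out)
--
-- def solution(m, musicinfos):
--     m = convert(m)
--     best_time, best_title = None, None
--     for info_str in musicinfos:
--         start, end, title, info = info_str.split(',')
--         info = convert(info)
--         time = (int(end[:2]) * 60 + int(end[3:])) - (int(start[:2]) * 60 + int(start[3:]))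
--         div, mod = divmod(time, len(info))
--         melody = info * div + info[:mod]
--         if m in melody and (best_time is None or time > best_time):
--             best_time, best_title = time, title
--     return best_title if best_title is not None else '(None)'
-- ===== Notes on version B (the rewrite author's own statement) =====
-- stated objective: simpler
-- what changed: B replaces A's collect-matches-then-sort(key=(-time,i)) with a single running best (strict > keeps the earliest-index maximum directly), and rewrites convert from a stack push/pop loop into a one-pass lookahead comprehension (emit each non-'#' char, lowercased iff the next char is '#').
import Mathlib
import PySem

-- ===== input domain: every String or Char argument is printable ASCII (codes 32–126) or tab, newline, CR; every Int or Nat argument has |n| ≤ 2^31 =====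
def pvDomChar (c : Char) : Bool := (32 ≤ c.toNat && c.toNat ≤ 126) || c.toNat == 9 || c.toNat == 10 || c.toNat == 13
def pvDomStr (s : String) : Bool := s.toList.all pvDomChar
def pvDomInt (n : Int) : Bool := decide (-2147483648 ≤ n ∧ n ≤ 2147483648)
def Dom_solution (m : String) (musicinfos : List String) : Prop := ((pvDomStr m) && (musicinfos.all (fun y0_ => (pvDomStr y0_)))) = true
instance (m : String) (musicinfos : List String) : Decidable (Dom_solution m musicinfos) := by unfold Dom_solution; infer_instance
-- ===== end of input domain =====

-- B keeps a running best (strict >, scan in index order) instead of A's list-of-matches plus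
-- sort(key=(-time, i)), and rewrites convert as a one-pass lookahead instead of a push/pop stack.
-- Equivalence is about the return value only (A sorts its local list, no caller-visible mutation).

-- ===== PORT A =====
-- convert: stack held top-first (Python appends/pops at the end; ''.join = reverse here);
-- none = IndexError (pop from empty stack).
def convertA_go (stack : List Char) : List Char → Option (List Char)
  | [] => some stack.reverse
  | c :: cs =>
    if c = '#' then
      match stack with
      | [] => none
      | t :: rest => convertA_go (PySem.Chars.lowerChar t :: rest) cs
    else convertA_go (c :: stack) cs

def convertA (s : List Char) : Option (List Char) := convertA_go [] s

-- one body of A's for-loop: none = the line raises (bad split / int() / pop / divmod by 0);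
-- some none = no match appended; some (some x) = x appended to result.
def parseA (mc : List Char) (i : Int) (line : String) : Option (Option (Int × Int × List Char)) :=
  match PySem.Chars.splitOn line.toList [','] with
  | [st, en, title, info] =>
    match convertA info with
    | none => none
    | some info' =>
      match PySem.Int.ofChars? (PySem.Chars.slice st none (some 2)),
            PySem.Int.ofChars? (PySem.Chars.slice st (some 3) none),
            PySem.Int.ofChars? (PySem.Chars.slice en none (some 2)),
            PySem.Int.ofChars? (PySem.Chars.slice en (some 3) none) with
      | some sh, some sm, some eh, some em =>
        let start := sh * 60 + sm
        let endt := eh * 60 + em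
        let time := endt - start
        match PySem.Int.divmod? time (info'.length : Int) with
        | none => none
        | some (dv, md) =>
          let melody := PySem.List.pyRepeat info' dv ++ PySem.Chars.slice info' none (some md)
          if PySem.Chars.isIn mc melody then some (some (time, i, title)) else some none
      | _, _, _, _ => none
  | _ => none

-- 'for i in range(len(musicinfos))' with the growing result list
def loopA (mc : List Char) (i : Int) : List String → List (Int × Int × List Char) → Option (List (Int × Int × List Char))
  | [], res => some res
  | s :: rest, res =>
    match parseA mc i s with
    | none => none
    | some none => loopA mc (i + 1) rest res
    | some (some x) => loopA mc (i + 1) rest (res ++ [x])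

def solution (m : String) (musicinfos : List String) : String :=
  match convertA m.toList with
  | none => ""        -- convert(m) raises; excluded by Pre_solution
  | some mc =>
    match loopA mc 0 musicinfos [] with
    | none => ""      -- some line raises; excluded by Pre_solution
    | some res =>
      match PySem.List.sorted2 res (fun x => -x.1) (fun x => x.2.1) false with
      | [] => "(None)"
      | x :: _ => String.ofList x.2.2

-- ===== PORT B =====
-- convert, one pass: emit each non-'#' char, lowercased iff the next char is '#'
def convertB : List Char → List Char
  | [] => []
  | c :: cs =>
    if c = '#' then convertB cs
    else
      match cs with
      | '#' :: _ => PySem.Chars.lowerChar c :: convertB cs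
      | _ => c :: convertB cs

-- one body of B's loop: threads the running best (time, title); none = the line raises
def stepB (mc : List Char) (best : Option (Int × List Char)) (line : String) : Option (Option (Int × List Char)) :=
  match PySem.Chars.splitOn line.toList [','] with
  | [st, en, title, info] =>
    let info' := convertB info
    match PySem.Int.ofChars? (PySem.Chars.slice st none (some 2)),
          PySem.Int.ofChars? (PySem.Chars.slice st (some 3) none),
          PySem.Int.ofChars? (PySem.Chars.slice en none (some 2)),
          PySem.Int.ofChars? (PySem.Chars.slice en (some 3) none) with
    | some sh, some sm, some eh, some em =>
      let time := (eh * 60 + em) - (sh * 60 + sm)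
      match PySem.Int.divmod? time (info'.length : Int) with
      | none => none
      | some (dv, md) =>
        let melody := PySem.List.pyRepeat info' dv ++ PySem.Chars.slice info' none (some md)
        if PySem.Chars.isIn mc melody then
          match best with
          | none => some (some (time, title))
          | some (bt, bttl) => if bt < time then some (some (time, title)) else some (some (bt, bttl))
        else some best
    | _, _, _, _ => none
  | _ => none

def loopB (mc : List Char) : List String → Option (Int × List Char) → Option (Option (Int × List Char))
  | [], b => some b
  | s :: rest, b =>
    match stepB mc b s with
    | none => none
    | some b' => loopB mc rest b'

def solution_alt (m : String) (musicinfos : List String) : String :=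
  let mc := convertB m.toList
  match loopB mc musicinfos none with
  | none => ""
  | some none => "(None)"
  | some (some (_, title)) => String.ofList title

-- ===== PRECONDITION & SPEC =====
-- linePre: the line splits into exactly 4 comma fields, both time fields parse as int(_[:2])
-- and int(_[3:]), the melody field does not start with '#' (pop from the empty stack) and has
-- at least one non-'#' char (len(convert(info)) > 0, else divmod by 0).
def linePre (line : String) : Bool :=
  match PySem.Chars.splitOn line.toList [','] with
  | [st, en, _, info] =>
    info.head? != some '#' && info.any (· != '#') &&
    (PySem.Int.ofChars? (PySem.Chars.slice st none (some 2))).isSome &&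
    (PySem.Int.ofChars? (PySem.Chars.slice st (some 3) none)).isSome &&
    (PySem.Int.ofChars? (PySem.Chars.slice en none (some 2))).isSome &&
    (PySem.Int.ofChars? (PySem.Chars.slice en (some 3) none)).isSome
  | _ => false

-- Pre_solution = exactly the inputs where Python A returns normally: m must not start with '#'
-- (IndexError in convert) and every line must satisfy linePre (ValueError / IndexError /
-- ZeroDivisionError otherwise).
def Pre_solution (m : String) (musicinfos : List String) : Prop :=
  m.toList.head? ≠ some '#' ∧ ∀ s ∈ musicinfos, linePre s = true

instance (m : String) (musicinfos : List String) : Decidable (Pre_solution m musicinfos) := by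
  unfold Pre_solution; infer_instance

def pvWitness_solution : String × List String :=
  ("ABC", ["12:00,12:14,HELLO,CDEFGAB", "12:00,12:06,WORLD,ABC#"])

def Spec_solution (m : String) (musicinfos : List String) (out : String) : Prop := out = solution_alt m musicinfos
instance (m : String) (musicinfos : List String) (out : String) : Decidable (Spec_solution m musicinfos out) := by unfold Spec_solution; infer_instance

-- ===== CLAIM (what is proved, stated in full; the proofs are below) =====
def Claim_equal_solution : Prop := ∀ (m : String) (musicinfos : List String), Dom_solution m musicinfos → Pre_solution m musicinfos → Spec_solution m musicinfos (solution m musicinfos)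

-- ===== LEMMAS AND PROOFS =====

-- lowering is idempotent (needed for runs of '#')
theorem isupper_lowerChar (c : Char) : PySem.Chars.isupper (PySem.Chars.lowerChar c) = false := by
  simp only [PySem.Chars.lowerChar]
  split
  · next h =>
    simp only [PySem.Chars.isupper, Bool.and_eq_true, decide_eq_true_eq] at h
    obtain ⟨h1, h2⟩ := h
    rw [Char.le_def] at h1 h2
    have h1' : 65 ≤ c.toNat := Fin.mk_le_mk.mp h1
    have h2' : c.toNat ≤ 90 := Fin.mk_le_mk.mp h2
    have hv : (c.toNat + 32).isValidChar := by left; omega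
    have ht : (Char.ofNat (c.toNat + 32)).toNat = c.toNat + 32 := by
      rw [Char.toNat_ofNat, if_pos hv]
    simp only [PySem.Chars.isupper, Bool.and_eq_false_iff, decide_eq_false_iff_not]
    right
    rw [Char.le_def]
    intro hle
    have h90 : (Char.ofNat (c.toNat + 32)).toNat ≤ 90 := Fin.mk_le_mk.mp hle
    omega
  · next h => simpa using h

theorem lowerChar_idem (c : Char) : PySem.Chars.lowerChar (PySem.Chars.lowerChar c) = PySem.Chars.lowerChar c := by
  have h := isupper_lowerChar c
  generalize PySem.Chars.lowerChar c = d at *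
  simp [PySem.Chars.lowerChar, h]

-- convertB on a cons, with the lookahead written through head?
theorem convertB_cons (c : Char) (cs : List Char) :
    convertB (c :: cs) = if c = '#' then convertB cs
      else (if cs.head? = some '#' then PySem.Chars.lowerChar c :: convertB cs else c :: convertB cs) := by
  by_cases hc : c = '#'
  · subst hc; rw [if_pos rfl]; rfl
  · have hbody : convertB (c :: cs) = if c = '#' then convertB cs
        else match cs with
          | '#' :: _ => PySem.Chars.lowerChar c :: convertB cs
          | _ => c :: convertB cs := rfl
    rw [hbody, if_neg hc, if_neg hc]
    cases cs with
    | nil => simp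
    | cons c' cs' =>
      simp only [List.head?_cons]
      by_cases h' : c' = '#'
      · subst h'; simp
      · rw [if_neg (by simpa using h')]
        split
        · next heq => simp_all
        · rfl

theorem convertA_go_spec (s : List Char) : ∀ (t : Char) (rest : List Char),
    convertA_go (t :: rest) s =
      some (rest.reverse ++ (if s.head? = some '#' then PySem.Chars.lowerChar t else t) :: convertB s) := by
  induction s with
  | nil => intro t rest; simp [convertA_go, convertB]
  | cons c cs ih =>
    intro t rest
    by_cases hc : c = '#'
    · subst hc
      rw [show convertA_go (t :: rest) ('#' :: cs) = convertA_go (PySem.Chars.lowerChar t :: rest) cs from rfl]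
      rw [ih, convertB_cons]
      simp only [List.head?_cons]
      by_cases h2 : cs.head? = some '#' <;> simp [h2, lowerChar_idem]
    · have h1 : convertA_go (t :: rest) (c :: cs) = convertA_go (c :: t :: rest) cs := by
        rw [show convertA_go (t :: rest) (c :: cs) = if c = '#' then (match t :: rest with
            | [] => none
            | t :: rest => convertA_go (PySem.Chars.lowerChar t :: rest) cs) else convertA_go (c :: t :: rest) cs from rfl]
        rw [if_neg hc]
      rw [h1, ih, convertB_cons, if_neg hc]
      simp only [List.reverse_cons, List.head?_cons]
      rw [if_neg (by simp [hc] : ¬ ((some c : Option Char) = some '#'))]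
      by_cases h2 : cs.head? = some '#' <;> simp [h2]

theorem convertA_eq (s : List Char) (h : s.head? ≠ some '#') : convertA s = some (convertB s) := by
  cases s with
  | nil => rfl
  | cons c cs =>
    have hc : ¬ c = '#' := by simpa using h
    rw [show convertA (c :: cs) = if c = '#' then (none : Option (List Char)) else convertA_go [c] cs by
      simp [convertA, convertA_go, hc]]
    rw [if_neg hc, convertA_go_spec, convertB_cons, if_neg hc]
    by_cases h2 : cs.head? = some '#' <;> simp [h2]

theorem convertB_ne_nil (s : List Char) (h : s.any (· != '#') = true) : convertB s ≠ [] := by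
  induction s with
  | nil => simp at h
  | cons c cs ih =>
    rw [convertB_cons]
    by_cases hc : c = '#'
    · subst hc
      simp only [List.any_cons] at h
      rw [if_pos rfl]
      exact ih (by simpa using h)
    · rw [if_neg hc]
      by_cases h2 : cs.head? = some '#' <;> simp [h2]

-- the running-best update, on full match triples (time, index, title) and on B's (time, title)
def updT (b : Option (Int × Int × List Char)) (x : Int × Int × List Char) : Option (Int × Int × List Char) :=
  match b with
  | none => some x
  | some y => if y.1 < x.1 then some x else some y

def updB (b : Option (Int × List Char)) (t : Int) (ttl : List Char) : Option (Int × List Char) :=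
  match b with
  | none => some (t, ttl)
  | some (bt, bttl) => if bt < t then some (t, ttl) else some (bt, bttl)

def projT (x : Int × Int × List Char) : Int × List Char := (x.1, x.2.2)

theorem proj_updT (b : Option (Int × Int × List Char)) (x : Int × Int × List Char) :
    (updT b x).map projT = updB (b.map projT) x.1 x.2.2 := by
  cases b with
  | none => rfl
  | some y =>
    obtain ⟨yt, yi, yttl⟩ := y
    obtain ⟨xt, xi, xttl⟩ := x
    simp only [updT, updB, projT, Option.map_some]
    split_ifs <;> rfl

-- per-line agreement under linePre
theorem line_agree (mc : List Char) (i : Int) (line : String) (h : linePre line = true) :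
    ∃ o : Option (Int × List Char),
      parseA mc i line = some (o.map fun p => (p.1, i, p.2)) ∧
      ∀ b, stepB mc b line = some (match o with | none => b | some (t, ttl) => updB b t ttl) := by
  rcases hsp : PySem.Chars.splitOn line.toList [','] with _ | ⟨st, _ | ⟨en, _ | ⟨title, _ | ⟨info, _ | ⟨z, tl⟩⟩⟩⟩⟩ <;>
    simp only [linePre, hsp, Bool.and_eq_true, bne_iff_ne, ne_eq] at h
  all_goals try exact absurd h Bool.false_ne_true
  obtain ⟨⟨⟨⟨⟨hinfo, hany⟩, hsh'⟩, hsm'⟩, heh'⟩, hem'⟩ := h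
  cases hsh : PySem.Int.ofChars? (PySem.Chars.slice st none (some 2)) with
  | none => rw [hsh] at hsh'; simp at hsh'
  | some sh =>
  cases hsm : PySem.Int.ofChars? (PySem.Chars.slice st (some 3) none) with
  | none => rw [hsm] at hsm'; simp at hsm'
  | some sm =>
  cases heh : PySem.Int.ofChars? (PySem.Chars.slice en none (some 2)) with
  | none => rw [heh] at heh'; simp at heh'
  | some eh =>
  cases hem : PySem.Int.ofChars? (PySem.Chars.slice en (some 3) none) with
  | none => rw [hem] at hem'; simp at hem'
  | some em =>
  have hcv : convertA info = some (convertB info) := convertA_eq info hinfo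
  have hlen : ((convertB info).length : Int) ≠ 0 := by
    have h0 := convertB_ne_nil info hany
    simpa using h0
  refine ⟨if PySem.Chars.isIn mc
      (PySem.List.pyRepeat (convertB info) (((eh * 60 + em) - (sh * 60 + sm)).fdiv ((convertB info).length : Int)) ++
        PySem.Chars.slice (convertB info) none (some (((eh * 60 + em) - (sh * 60 + sm)).fmod ((convertB info).length : Int))))
      then some ((eh * 60 + em) - (sh * 60 + sm), title) else none, ?_, ?_⟩
  · simp only [parseA, hsp, hcv, hsh, hsm, heh, hem, PySem.Int.divmod?, if_neg hlen]
    split <;> simp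
  · intro b
    simp only [stepB, hsp, hsh, hsm, heh, hem, PySem.Int.divmod?, if_neg hlen]
    split
    · cases b with
      | none => rfl
      | some p => obtain ⟨bt, bttl⟩ := p; simp only [updB]; split_ifs <;> rfl
    · cases b <;> rfl

-- the two loops agree: A collects matches (indices increasing), B keeps their running best
theorem loop_agree (mc : List Char) : ∀ (lines : List String) (i : Int) (res : List (Int × Int × List Char)),
    (∀ s ∈ lines, linePre s = true) →
    (∀ x ∈ res, x.2.1 < i) →
    ∃ res', loopA mc i lines res = some res' ∧
      (∀ x ∈ res', x.2.1 < i + lines.length) ∧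
      (res.Pairwise (fun a b => a.2.1 < b.2.1) → res'.Pairwise (fun a b => a.2.1 < b.2.1)) ∧
      loopB mc lines ((res.foldl updT none).map projT) = some ((res'.foldl updT none).map projT) := by
  intro lines
  induction lines with
  | nil =>
    intro i res _ hres
    exact ⟨res, rfl, by simpa using hres, fun hp => hp, rfl⟩
  | cons s rest ih =>
    intro i res hpre hres
    obtain ⟨o, hA, hB⟩ := line_agree mc i s (hpre s (by simp))
    cases o with
    | none =>
      obtain ⟨res', h1, h2, h3, h4⟩ := ih (i + 1) res (fun t ht => hpre t (by simp [ht]))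
        (fun x hx => lt_trans (hres x hx) (by omega))
      refine ⟨res', by simp [loopA, hA, h1], fun x hx => ?_, h3, by simp [loopB, hB, h4]⟩
      have := h2 x hx
      simp only [List.length_cons]
      push_cast at this ⊢
      omega
    | some p =>
      obtain ⟨t, ttl⟩ := p
      have hstep : ∀ x ∈ res ++ [(t, i, ttl)], x.2.1 < i + 1 := by
        intro x hx
        rcases List.mem_append.mp hx with hx | hx
        · exact lt_trans (hres x hx) (by omega)
        · simp at hx; subst hx; simp
      obtain ⟨res', h1, h2, h3, h4⟩ := ih (i + 1) (res ++ [(t, i, ttl)])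
        (fun u hu => hpre u (by simp [hu])) hstep
      refine ⟨res', by simp [loopA, hA, h1], fun x hx => ?_, fun hp => h3 ?_, ?_⟩
      · have := h2 x hx
        simp only [List.length_cons]
        push_cast at this ⊢
        omega
      · rw [List.pairwise_append]
        exact ⟨hp, by simp, fun a ha b hb => by simp at hb; subst hb; exact hres a ha⟩
      · have hfold : ((res ++ [(t, i, ttl)]).foldl updT none).map projT =
            updB ((res.foldl updT none).map projT) t ttl := by
          rw [List.foldl_append]
          simpa using proj_updT (res.foldl updT none) (t, i, ttl)
        simp only [loopB, hB]
        rw [← hfold]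
        exact h4

-- head of A's insertion sort with key (-time, i) = the running best, when indices increase
def cmpA (a b : Int × Int × List Char) : Bool :=
  decide (-a.1 < -b.1) || (!decide (-b.1 < -a.1) && decide (a.2.1 < b.2.1))

theorem head_insert_fold : ∀ (l acc : List (Int × Int × List Char)),
    (∀ x ∈ l, ∀ h ∈ acc.head?, h.2.1 < x.2.1) →
    l.Pairwise (fun a b => a.2.1 < b.2.1) →
    (l.foldl (fun a x => PySem.List.insertBy cmpA x a) acc).head? = l.foldl updT acc.head? := by
  intro l
  induction l with
  | nil => intro acc _ _; rfl
  | cons x rest ih =>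
    intro acc hacc hpair
    have hhd : (PySem.List.insertBy cmpA x acc).head? = updT acc.head? x := by
      cases acc with
      | nil => rfl
      | cons y ys =>
        have hyx : y.2.1 < x.2.1 := hacc x (by simp) y (by simp)
        have hcmp : cmpA x y = decide (y.1 < x.1) := by
          simp only [cmpA]
          have : ¬ (x.2.1 < y.2.1) := by omega
          simp [this, neg_lt_neg_iff]
        rw [show PySem.List.insertBy cmpA x (y :: ys) =
            if cmpA x y then x :: y :: ys else y :: PySem.List.insertBy cmpA x ys from rfl]
        rw [hcmp]
        by_cases hlt : y.1 < x.1
        · simp [hlt, updT]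
        · simp [hlt, updT]
    have hmem : (PySem.List.insertBy cmpA x acc).head? = some x ∨
        (PySem.List.insertBy cmpA x acc).head? = acc.head? := by
      rw [hhd]
      cases acc with
      | nil => left; rfl
      | cons y ys =>
        simp only [updT, List.head?_cons]
        split_ifs
        · left; rfl
        · right; rfl
    rw [List.foldl_cons, List.foldl_cons, ← hhd]
    apply ih
    · intro z hz h hh
      rcases hmem with hm | hm
      · rw [hm] at hh
        simp at hh; subst hh
        exact (List.pairwise_cons.mp hpair).1 z hz
      · rw [hm] at hh
        exact hacc z (by simp [hz]) h hh
    · exact (List.pairwise_cons.mp hpair).2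

theorem sorted2_head (res : List (Int × Int × List Char))
    (h : res.Pairwise (fun a b => a.2.1 < b.2.1)) :
    (PySem.List.sorted2 res (fun x => -x.1) (fun x => x.2.1) false).head? = res.foldl updT none := by
  have hs : PySem.List.sorted2 res (fun x => -x.1) (fun x => x.2.1) false =
      res.foldl (fun a x => PySem.List.insertBy cmpA x a) [] := rfl
  rw [hs]
  exact head_insert_fold res [] (by intro x _ h' hh; simp at hh) h

-- ===== VERDICT (by name: the statement is the Claim_ definition above) =====
theorem solution_spec : Claim_equal_solution := by
  intro m mus _hdom hpre
  obtain ⟨hm, hl⟩ := hpre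
  unfold Spec_solution
  have hconv : convertA m.toList = some (convertB m.toList) := convertA_eq _ hm
  obtain ⟨res', hA, _hbound, hpairf, hB⟩ :=
    loop_agree (convertB m.toList) mus 0 [] hl (by simp)
  have hp : res'.Pairwise (fun a b => a.2.1 < b.2.1) := hpairf (by simp)
  have hhead := sorted2_head res' hp
  simp only [List.foldl_nil, Option.map_none] at hB
  cases hbest : res'.foldl updT none with
  | none =>
    have hnil : PySem.List.sorted2 res' (fun x => -x.1) (fun x => x.2.1) false = [] :=
      List.head?_eq_none_iff.mp (by rw [hhead, hbest])
    simp [solution, solution_alt, hconv, hA, hB, hnil, hbest]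
  | some y =>
    obtain ⟨tl, htl⟩ := List.head?_eq_some_iff.mp (by rw [hhead, hbest] :
      (PySem.List.sorted2 res' (fun x => -x.1) (fun x => x.2.1) false).head? = some y)
    simp [solution, solution_alt, hconv, hA, hB, htl, hbest, projT]
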